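-- pv_equiv track=rewrite | github.com/Ricskal/Advent_of_code_2024 | Day 5/Code.py | parsePageOrderList
-- ===== SOURCE A (Python) =====
-- def parsePageOrderList(pageOrderList):
--     # Convert pageOrderList into a dictionary for easier lookups
--     beforeAfterNumberDict = {}
--     for pair in pageOrderList:
--         number1, number2 = pair[0], pair[1]
--         # Create or update dictionary entries for the relationship between numbers
--         if number1 not in beforeAfterNumberDict:
--             beforeAfterNumberDict[number1] = [[], [number2]]
--         else:
--             beforeAfterNumberDict[number1][1].append(number2)
--         if number2 not in beforeAfterNumberDict:
--             beforeAfterNumberDict[number2] = [[number1], []]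
--         else:
--             beforeAfterNumberDict[number2][0].append(number1)
--     return beforeAfterNumberDict
-- ===== SOURCE B (Python) =====
-- def parsePageOrderList(pageOrderList):
--     # Two-phase: first determine the keys in first-appearance order, then build
--     # each entry by rescanning the pair list with per-key comprehensions.
--     keys = []
--     for pair in pageOrderList:
--         for k in (pair[0], pair[1]):
--             if k not in keys:
--                 keys.append(k)
--     return {k: [[p[0] for p in pageOrderList if p[1] == k],
--                 [p[1] for p in pageOrderList if p[0] == k]]
--             for k in keys}
-- ===== Notes on version B (the rewrite author's own statement) =====
-- stated objective: alternative
-- what changed: A builds the combined {page: [before, after]} dict in one interleaved pass with four create/append branch cases; B first collects the distinct keys in first-appearance order and then builds each entry by rescanning the whole pair list with two per-key filtering comprehensions (no incremental dict mutation at all).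
import Mathlib
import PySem

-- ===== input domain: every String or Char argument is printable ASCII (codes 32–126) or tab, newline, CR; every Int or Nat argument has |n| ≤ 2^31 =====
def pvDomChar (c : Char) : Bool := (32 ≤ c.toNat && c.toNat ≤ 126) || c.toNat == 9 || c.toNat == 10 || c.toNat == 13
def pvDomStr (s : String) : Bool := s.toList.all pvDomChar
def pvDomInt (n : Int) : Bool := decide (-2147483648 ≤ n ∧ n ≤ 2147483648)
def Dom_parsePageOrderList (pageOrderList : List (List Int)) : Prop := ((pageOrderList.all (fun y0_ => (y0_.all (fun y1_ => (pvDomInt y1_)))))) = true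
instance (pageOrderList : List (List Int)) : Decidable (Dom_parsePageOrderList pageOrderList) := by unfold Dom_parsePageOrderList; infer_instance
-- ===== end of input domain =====

-- B replaces A's single interleaved dict-building pass by a two-phase alternative:
-- a first pass collects the keys in first-appearance order, then each entry is built
-- by rescanning the whole pair list with two per-key comprehensions (objective:
-- alternative decomposition, not faster — B is O(n*k) vs A's O(n)).


-- shared destructuring of the two indexings 'pair[0], pair[1]' (none = IndexError, see Pre_)
def pvPair2 {A : Type} (x y : Option Int) (dflt : A) (f : Int → Int → A) : A :=
  match x, y with
  | some number1, some number2 => f number1 number2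
  | _, _ => dflt

-- ===== PORT A =====
-- in-place `value[1].append(number2)` / `value[0].append(number1)` on the 2-element
-- value list, ported as rebuilding the pair (exact: A's values always have length 2)
def pvAppendAfter (v : List (List Int)) (n : Int) : List (List Int) := [v.getD 0 [], v.getD 1 [] ++ [n]]
def pvAppendBefore (v : List (List Int)) (n : Int) : List (List Int) := [v.getD 0 [] ++ [n], v.getD 1 []]

-- one iteration of A's loop body, for pair elements number1, number2
def parseStepA (d : PySem.Dict Int (List (List Int))) (number1 number2 : Int) :
    PySem.Dict Int (List (List Int)) :=
  let d1 := if d.contains number1 then d.modify number1 [] (fun v => pvAppendAfter v number2)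
            else d.insert number1 [[], [number2]]
  if d1.contains number2 then d1.modify number2 [] (fun v => pvAppendBefore v number1)
  else d1.insert number2 [[number1], []]

def parsePageOrderList (pageOrderList : List (List Int)) : List (Int × List (List Int)) :=
  (pageOrderList.foldl (fun d pair =>
    pvPair2 (PySem.List.pyGet? pair 0) (PySem.List.pyGet? pair 1) d (parseStepA d)
    ) PySem.Dict.empty).items

-- ===== PORT B =====
-- `if k not in keys: keys.append(k)`
def pvAddKey (ks : List Int) (k : Int) : List Int := if k ∈ ks then ks else ks ++ [k]

-- the comprehension filters: `p[0] for p in … if p[1] == k` and `p[1] for p in … if p[0] == k`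
def pvSelBefore (k : Int) (p : List Int) : Option Int :=
  match PySem.List.pyGet? p 1, PySem.List.pyGet? p 0 with
  | some b, some a => if b = k then some a else none
  | _, _ => none
def pvSelAfter (k : Int) (p : List Int) : Option Int :=
  match PySem.List.pyGet? p 0, PySem.List.pyGet? p 1 with
  | some a, some b => if a = k then some b else none
  | _, _ => none

def parsePageOrderList_alt (pageOrderList : List (List Int)) : List (Int × List (List Int)) :=
  let keys := pageOrderList.foldl (fun ks pair =>
    pvPair2 (PySem.List.pyGet? pair 0) (PySem.List.pyGet? pair 1) ks
      (fun n1 n2 => pvAddKey (pvAddKey ks n1) n2)) []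
  -- the dict comprehension {k: [[…], […]] for k in keys}
  (keys.foldl (fun d k =>
      d.insert k [pageOrderList.filterMap (pvSelBefore k), pageOrderList.filterMap (pvSelAfter k)])
    PySem.Dict.empty).items

-- ===== PRECONDITION & SPEC =====
-- Pre_ excludes inputs containing a pair of fewer than two elements, on which A's
-- pair[0] / pair[1] raises IndexError.
def Pre_parsePageOrderList (pageOrderList : List (List Int)) : Prop :=
  ∀ pair ∈ pageOrderList, 2 ≤ pair.length
instance (pageOrderList : List (List Int)) : Decidable (Pre_parsePageOrderList pageOrderList) := by
  unfold Pre_parsePageOrderList; infer_instance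
def pvWitness_parsePageOrderList : List (List Int) := [[1, 2], [2, 3], [1, 3]]

def Spec_parsePageOrderList (pageOrderList : List (List Int)) (out : List (Int × List (List Int))) : Prop := out = parsePageOrderList_alt pageOrderList
instance (pageOrderList : List (List Int)) (out : List (Int × List (List Int))) : Decidable (Spec_parsePageOrderList pageOrderList out) := by unfold Spec_parsePageOrderList; infer_instance

-- ===== CLAIM (what is proved, stated in full; the proofs are below) =====
def Claim_equal_parsePageOrderList : Prop := ∀ (pageOrderList : List (List Int)), Dom_parsePageOrderList pageOrderList → Pre_parsePageOrderList pageOrderList → Spec_parsePageOrderList pageOrderList (parsePageOrderList pageOrderList)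

-- ===== LEMMAS AND PROOFS =====

theorem mem_pvAddKey (ks : List Int) (n k : Int) : k ∈ pvAddKey ks n ↔ k = n ∨ k ∈ ks := by
  unfold pvAddKey; split_ifs with h
  · constructor
    · exact Or.inr
    · rintro (rfl | hm); exacts [h, hm]
  · simp [or_comm]

theorem nodup_pvAddKey (ks : List Int) (n : Int) (h : ks.Nodup) : (pvAddKey ks n).Nodup := by
  unfold pvAddKey; split_ifs with hm
  · exact h
  · rw [List.nodup_append]
    refine ⟨h, List.nodup_singleton n, ?_⟩
    intro a ha b hb
    simp only [List.mem_singleton] at hb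
    subst hb
    exact fun heq => hm (heq ▸ ha)

theorem modify_eq_insert (d : PySem.Dict Int (List (List Int))) (k : Int) (f : List (List Int) → List (List Int)) :
    d.modify k [] f = d.insert k (f (d.getD k [])) := rfl

theorem stepA_eq (d : PySem.Dict Int (List (List Int))) (n1 n2 : Int) :
    parseStepA d n1 n2 =
      ((d.insert n1 (if d.contains n1 then pvAppendAfter (d.getD n1 []) n2 else [[], [n2]])).insert n2
        (if (d.insert n1 (if d.contains n1 then pvAppendAfter (d.getD n1 []) n2 else [[], [n2]])).contains n2
         then pvAppendBefore ((d.insert n1 (if d.contains n1 then pvAppendAfter (d.getD n1 []) n2 else [[], [n2]])).getD n2 []) n1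
         else [[n1], []])) := by
  have h1 : (if d.contains n1 then d.modify n1 [] (fun v => pvAppendAfter v n2) else d.insert n1 [[], [n2]])
      = d.insert n1 (if d.contains n1 then pvAppendAfter (d.getD n1 []) n2 else [[], [n2]]) := by
    by_cases hc : d.contains n1 <;> simp [hc, modify_eq_insert]
  unfold parseStepA
  rw [h1]
  by_cases hc2 : (d.insert n1 (if d.contains n1 then pvAppendAfter (d.getD n1 []) n2 else [[], [n2]])).contains n2 <;>
    simp [hc2, modify_eq_insert]

theorem keys_insert_addKey (d : PySem.Dict Int (List (List Int))) (k : Int) (v : List (List Int)) :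
    (d.insert k v).keys = pvAddKey d.keys k := by
  unfold pvAddKey
  by_cases hc : k ∈ d.keys
  · rw [PySem.Dict.keys_insert_of_contains _ _ (by rw [PySem.Dict.contains_eq_decide_mem_keys]; simpa),
      if_pos hc]
  · rw [PySem.Dict.keys_insert_of_not_contains _ _ (by rw [PySem.Dict.contains_eq_decide_mem_keys]; simpa),
      if_neg hc]

theorem pyGet?_cons2_0 (a b : Int) (t : List Int) : PySem.List.pyGet? (a :: b :: t) 0 = some a := by
  have h : (0:Int) ≤ (t.length:Int) + 1 := by positivity
  simp [PySem.List.pyGet?, PySem.List.pyIdx?, h]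
theorem pyGet?_cons2_1 (a b : Int) (t : List Int) : PySem.List.pyGet? (a :: b :: t) 1 = some b := by
  simp [PySem.List.pyGet?, PySem.List.pyIdx?]

theorem pvPair2_some {A : Type} (a b : Int) (d : A) (f : Int → Int → A) :
    pvPair2 (some a) (some b) d f = f a b := rfl

theorem selBefore_cons2 (k n1 n2 : Int) (rest : List Int) :
    pvSelBefore k (n1 :: n2 :: rest) = if n2 = k then some n1 else none := by
  simp [pvSelBefore]
theorem selAfter_cons2 (k n1 n2 : Int) (rest : List Int) :
    pvSelAfter k (n1 :: n2 :: rest) = if n1 = k then some n2 else none := by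
  simp [pvSelAfter]

-- one step of A preserves the relation to (keys so far, per-key collected lists)
theorem stepA_inv (d : PySem.Dict Int (List (List Int))) (ks : List Int) (F G : Int → List Int)
    (n1 n2 : Int)
    (hk : d.keys = ks)
    (hval : ∀ k ∈ ks, d.get? k = some [F k, G k])
    (hemp : ∀ k, k ∉ ks → F k = [] ∧ G k = []) :
    (parseStepA d n1 n2).keys = pvAddKey (pvAddKey ks n1) n2 ∧
    (∀ k ∈ pvAddKey (pvAddKey ks n1) n2,
      (parseStepA d n1 n2).get? k =
        some [F k ++ (if n2 = k then [n1] else []), G k ++ (if n1 = k then [n2] else [])]) ∧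
    (∀ k, k ∉ pvAddKey (pvAddKey ks n1) n2 →
      F k ++ (if n2 = k then [n1] else []) = [] ∧ G k ++ (if n1 = k then [n2] else []) = []) := by
  have hvalD : ∀ k ∈ ks, d.getD k [] = [F k, G k] := fun k hm =>
    PySem.Dict.getD_of_get?_eq_some _ _ (hval k hm)
  have hcmem : ∀ k : Int, d.contains k = decide (k ∈ ks) := by
    intro k; rw [PySem.Dict.contains_eq_decide_mem_keys, hk]
  set V1 := (if d.contains n1 then pvAppendAfter (d.getD n1 []) n2 else [[], [n2]]) with hV1
  set d1 := d.insert n1 V1 with hd1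
  -- V1 is always [F n1, G n1 ++ [n2]]
  have hV1eq : V1 = [F n1, G n1 ++ [n2]] := by
    rw [hV1, hcmem]
    by_cases hm : n1 ∈ ks
    · rw [if_pos (by simpa), hvalD n1 hm]; simp [pvAppendAfter]
    · rw [if_neg (by simpa), (hemp n1 hm).1, (hemp n1 hm).2]
      simp
  have hk1 : d1.keys = pvAddKey ks n1 := by rw [hd1, keys_insert_addKey, hk]
  have hc1 : ∀ k : Int, d1.contains k = decide (k ∈ pvAddKey ks n1) := by
    intro k; rw [PySem.Dict.contains_eq_decide_mem_keys, hk1]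
  refine ⟨?_, ?_, ?_⟩
  · rw [stepA_eq, ← hV1, ← hd1, keys_insert_addKey, hk1]
  · intro k hkm
    rw [stepA_eq, ← hV1, ← hd1, PySem.Dict.get?_insert]
    by_cases h2 : k = n2
    · subst h2
      rw [if_pos rfl, hc1]
      by_cases h1 : k = n1
      · subst h1
        have : k ∈ pvAddKey ks k := by rw [mem_pvAddKey]; exact Or.inl rfl
        rw [if_pos (by simpa), hd1, PySem.Dict.getD_insert, if_pos rfl, hV1eq]
        simp [pvAppendBefore]
      · by_cases hm : k ∈ pvAddKey ks n1
        · have hmks : k ∈ ks := by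
            rcases (mem_pvAddKey ks n1 k).1 hm with h | h; exact absurd h h1; exact h
          rw [if_pos (by simpa), hd1, PySem.Dict.getD_insert, if_neg h1, hvalD k hmks]
          simp [pvAppendBefore, Ne.symm h1]
        · have hmks : k ∉ ks := fun h => hm ((mem_pvAddKey ks n1 k).2 (Or.inr h))
          rw [if_neg (by simpa), (hemp k hmks).1, (hemp k hmks).2]
          simp [Ne.symm h1]
    · rw [if_neg h2, hd1, PySem.Dict.get?_insert]
      by_cases h1 : k = n1
      · subst h1
        rw [if_pos rfl, hV1eq]
        simp [Ne.symm h2]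
      · have hmks : k ∈ ks := by
          rcases (mem_pvAddKey _ n2 k).1 hkm with h | h; exact absurd h h2
          rcases (mem_pvAddKey ks n1 k).1 h with h' | h'; exact absurd h' h1; exact h'
        rw [if_neg h1, hval k hmks]
        simp [Ne.symm h1, Ne.symm h2]
  · intro k hkm
    have h2 : k ≠ n2 := fun h => hkm ((mem_pvAddKey _ n2 k).2 (Or.inl h))
    have h1 : k ≠ n1 := fun h =>
      hkm ((mem_pvAddKey _ n2 k).2 (Or.inr ((mem_pvAddKey ks n1 k).2 (Or.inl h))))
    have hmks : k ∉ ks := fun h =>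
      hkm ((mem_pvAddKey _ n2 k).2 (Or.inr ((mem_pvAddKey ks n1 k).2 (Or.inr h))))
    rw [(hemp k hmks).1, (hemp k hmks).2]
    simp [Ne.symm h1, Ne.symm h2]

-- the main invariant: folding A's loop over l, starting from (d, ks, F, G) in relation
theorem fold_inv (l : List (List Int)) (hpre : ∀ p ∈ l, 2 ≤ p.length)
    (d : PySem.Dict Int (List (List Int))) (ks : List Int) (F G : Int → List Int)
    (hk : d.keys = ks) (hnd : ks.Nodup)
    (hval : ∀ k ∈ ks, d.get? k = some [F k, G k])
    (hemp : ∀ k, k ∉ ks → F k = [] ∧ G k = []) :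
    (l.foldl (fun d pair =>
        pvPair2 (PySem.List.pyGet? pair 0) (PySem.List.pyGet? pair 1) d (parseStepA d)) d).keys
      = l.foldl (fun ks pair =>
        pvPair2 (PySem.List.pyGet? pair 0) (PySem.List.pyGet? pair 1) ks
          (fun n1 n2 => pvAddKey (pvAddKey ks n1) n2)) ks ∧
    (l.foldl (fun ks pair =>
        pvPair2 (PySem.List.pyGet? pair 0) (PySem.List.pyGet? pair 1) ks
          (fun n1 n2 => pvAddKey (pvAddKey ks n1) n2)) ks).Nodup ∧
    (∀ k ∈ (l.foldl (fun ks pair =>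
        pvPair2 (PySem.List.pyGet? pair 0) (PySem.List.pyGet? pair 1) ks
          (fun n1 n2 => pvAddKey (pvAddKey ks n1) n2)) ks),
      (l.foldl (fun d pair =>
        pvPair2 (PySem.List.pyGet? pair 0) (PySem.List.pyGet? pair 1) d (parseStepA d)) d).get? k
        = some [F k ++ l.filterMap (pvSelBefore k), G k ++ l.filterMap (pvSelAfter k)]) := by
  induction l generalizing d ks F G with
  | nil =>
    refine ⟨hk, hnd, ?_⟩
    intro k hkm
    simpa using hval k hkm
  | cons pair t ih =>
    obtain ⟨n1, n2, rest, rfl⟩ : ∃ n1 n2 rest, pair = n1 :: n2 :: rest := by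
      have := hpre pair (by simp)
      match pair with
      | n1 :: n2 :: rest => exact ⟨n1, n2, rest, rfl⟩
    simp only [List.foldl_cons, pyGet?_cons2_0, pyGet?_cons2_1, pvPair2_some]
    obtain ⟨sk, sval, semp⟩ := stepA_inv d ks F G n1 n2 hk hval hemp
    have hnd' : (pvAddKey (pvAddKey ks n1) n2).Nodup :=
      nodup_pvAddKey _ _ (nodup_pvAddKey _ _ hnd)
    obtain ⟨rk, rnd, rval⟩ := ih (fun p hp => hpre p (by simp [hp])) (parseStepA d n1 n2)
      (pvAddKey (pvAddKey ks n1) n2)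
      (fun k => F k ++ (if n2 = k then [n1] else []))
      (fun k => G k ++ (if n1 = k then [n2] else [])) sk hnd' sval semp
    refine ⟨rk, rnd, ?_⟩
    intro k hkm
    rw [rval k hkm, List.filterMap_cons, List.filterMap_cons, selBefore_cons2, selAfter_cons2]
    by_cases h2 : n2 = k <;> by_cases h1 : n1 = k <;> simp [h1, h2]

theorem parse_eq (l : List (List Int)) (hpre : ∀ pair ∈ l, 2 ≤ pair.length) :
    parsePageOrderList l = parsePageOrderList_alt l := by
  obtain ⟨hk, hnd, hval⟩ := fold_inv l hpre PySem.Dict.empty [] (fun _ => []) (fun _ => [])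
    (by simp [PySem.Dict.keys_empty]) (by simp) (by simp) (by simp)
  unfold parsePageOrderList parsePageOrderList_alt
  simp only []
  rw [PySem.Dict.items_eq_map_keys _ (hk ▸ hnd) [], hk]
  rw [PySem.Dict.items_foldl_insert_fresh _ (fun k => k)
    (fun k => [l.filterMap (pvSelBefore k), l.filterMap (pvSelAfter k)])
    PySem.Dict.empty (by intro a _; simp [PySem.Dict.contains_empty]) (by simpa using hnd)]
  show _ = [] ++ _
  rw [List.nil_append]
  refine List.map_congr_left ?_
  intro k hkm
  have := hval k hkm
  simp only [List.nil_append] at this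
  rw [PySem.Dict.getD_of_get?_eq_some _ _ this]

-- ===== VERDICT (by name: the statement is the Claim_ definition above) =====
theorem parsePageOrderList_spec : Claim_equal_parsePageOrderList := by
  intro l _hdom hpre
  show parsePageOrderList l = parsePageOrderList_alt l
  exact parse_eq l hpre
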